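-- pv_equiv track=rewrite | github.com/mstibbard/aoc | 2023/01.py | convert_alpha_to_digits
-- ===== SOURCE A (Python) =====
-- NUM_DICT = {
--     "one": "1",
--     "two": "2",
--     "three": "3",
--     "four": "4",
--     "five": "5",
--     "six": "6",
--     "seven": "7",
--     "eight": "8",
--     "nine": "9",
-- }
--
-- def convert_alpha_to_digits(text: str) -> str:
--     copy = text
--     for i, c in enumerate(copy):
--         substring = copy[i:]
--         for word, digit in NUM_DICT.items():
--             if substring.startswith(word):
--                 copy = copy[:i] + digit + copy[i + 1 :]
--     return copy
-- ===== SOURCE B (Python) =====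
-- NUM_DICT = {
--     "one": "1",
--     "two": "2",
--     "three": "3",
--     "four": "4",
--     "five": "5",
--     "six": "6",
--     "seven": "7",
--     "eight": "8",
--     "nine": "9",
-- }
--
-- def convert_alpha_to_digits(text: str) -> str:
--     chars = list(text)
--     for word, digit in NUM_DICT.items():
--         start = 0
--         while True:
--             i = text.find(word, start)
--             if i == -1:
--                 break
--             chars[i] = digit
--             start = i + 1
--     return "".join(chars)
-- ===== Notes on version B (the rewrite author's own statement) =====
-- stated objective: faster
-- what changed: A rescans every position against all nine words and rebuilds the whole string by slicing on each hit; B makes one text.find scan per number word, writing digits into a mutable character list that is joined once.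
import Mathlib
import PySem

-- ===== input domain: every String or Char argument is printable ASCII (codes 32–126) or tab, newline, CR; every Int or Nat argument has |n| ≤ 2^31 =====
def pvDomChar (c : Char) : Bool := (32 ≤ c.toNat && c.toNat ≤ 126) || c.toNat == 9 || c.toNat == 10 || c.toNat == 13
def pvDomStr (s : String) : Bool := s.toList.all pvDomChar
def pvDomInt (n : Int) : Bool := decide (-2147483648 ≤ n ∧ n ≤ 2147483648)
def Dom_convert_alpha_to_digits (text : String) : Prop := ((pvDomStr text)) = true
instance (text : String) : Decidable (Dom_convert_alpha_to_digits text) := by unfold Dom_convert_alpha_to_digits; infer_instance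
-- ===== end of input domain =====

-- B replaces A's per-position rescan with repeated full-string reconstruction by one text.find scan
-- per number word writing digits into a char list (objective: faster, and equal on every input).

-- NUM_DICT.items(), shared module context of both implementations
def pvNumPairs : List (List Char × Char) :=
  [(['o','n','e'], '1'), (['t','w','o'], '2'), (['t','h','r','e','e'], '3'),
   (['f','o','u','r'], '4'), (['f','i','v','e'], '5'), (['s','i','x'], '6'),
   (['s','e','v','e','n'], '7'), (['e','i','g','h','t'], '8'), (['n','i','n','e'], '9')]

-- ===== PORT A =====
-- copy = copy[:i] + digit + copy[i+1:]  (guarded by substring.startswith(word))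
def pvReplaceStep (i : Int) (substring : List Char) (copy : List Char) (wd : List Char × Char) : List Char :=
  if PySem.Chars.startswith substring wd.1 then
    PySem.List.slice copy none (some i) ++ [wd.2] ++ PySem.List.slice copy (some (i + 1)) none
  else copy

-- one iteration of A's outer loop: substring = copy[i:], then the inner loop over NUM_DICT.items()
def pvOuterStep (copy : List Char) (i : Int) : List Char :=
  let substring := PySem.List.slice copy (some i) none
  pvNumPairs.foldl (pvReplaceStep i substring) copy

def convert_alpha_to_digits (text : String) : String :=
  String.ofList ((PySem.List.enumerate text.toList).foldl (fun copy ic => pvOuterStep copy ic.1) text.toList)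

-- ===== PORT B =====
-- B's inner while loop: i = text.find(word, start); chars[i] = digit; start = i + 1.
-- The two leading guards only make the recursion total: with w = [] B's Python is never called
-- (every NUM_DICT word is nonempty), and for start > len(t) Python's find returns -1 and the
-- loop breaks with chars unchanged, which is exactly what the guard returns.
def pvFindLoop (t w : List Char) (d : Char) (chars : List Char) (start : Nat) : List Char :=
  if _hw : w = [] then chars
  else if _hs : t.length < start then chars
  else
    let i := PySem.Chars.findFrom t w (start : Int) none
    if _h1 : i = -1 then chars
    else pvFindLoop t w d (PySem.List.pySetD chars i d) (i.toNat + 1)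
termination_by t.length + 1 - start
decreasing_by
  have hk : start ≤ t.length := by omega
  have hspec := PySem.Chars.findFrom_natCast_spec t w start hk _h1
  omega

def convert_alpha_to_digits_alt (text : String) : String :=
  let t := text.toList
  let chars := t
  String.ofList (pvNumPairs.foldl (fun chars wd => pvFindLoop t wd.1 wd.2 chars 0) chars)

-- ===== PRECONDITION & SPEC =====
def Spec_convert_alpha_to_digits (text : String) (out : String) : Prop := out = convert_alpha_to_digits_alt text
instance (text : String) (out : String) : Decidable (Spec_convert_alpha_to_digits text out) := by unfold Spec_convert_alpha_to_digits; infer_instance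

-- ===== CLAIM (what is proved, stated in full; the proofs are below) =====
def Claim_equal_convert_alpha_to_digits : Prop := ∀ (text : String), Dom_convert_alpha_to_digits text → Spec_convert_alpha_to_digits text (convert_alpha_to_digits text)

-- ===== LEMMAS AND PROOFS =====
theorem pvFindLoop_length (t w : List Char) (d : Char) (chars : List Char) (start : Nat) :
    (pvFindLoop t w d chars start).length = chars.length := by
  induction chars, start using pvFindLoop.induct t w d with
  | case1 chars start hw => rw [pvFindLoop]; simp [hw]
  | case2 chars start hw hs => rw [pvFindLoop]; simp only [dif_neg hw, dif_pos hs]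
  | case3 chars start hw hs i h1 =>
      have h1' : PySem.Chars.findFrom t w (start : Int) = -1 := h1
      rw [pvFindLoop]; simp only [dif_neg hw, dif_neg hs, dif_pos h1']
  | case4 chars start hw hs i h1 ih =>
      have h1' : ¬ PySem.Chars.findFrom t w (start : Int) = -1 := h1
      have ih' : (pvFindLoop t w d (PySem.List.pySetD chars (PySem.Chars.findFrom t w (start : Int)) d) ((PySem.Chars.findFrom t w (start : Int)).toNat + 1)).length = (PySem.List.pySetD chars (PySem.Chars.findFrom t w (start : Int)) d).length := ih
      rw [pvFindLoop]
      simp only [dif_neg hw, dif_neg hs, dif_neg h1']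
      rw [ih']
      simp [PySem.List.length_pySetD]

theorem pv_lt_of_prefix_drop {t w : List Char} {i : Nat} (h : w <+: t.drop i) (hw : w ≠ []) :
    i < t.length := by
  have h1 := h.length_le
  have h2 := List.length_drop (l := t) (i := i)
  have h3 : w.length ≠ 0 := by simpa using hw
  omega

theorem pvFindLoop_getElem? (t w : List Char) (hw : w ≠ []) (d : Char) (chars : List Char)
    (start : Nat) (hlen : chars.length = t.length) (i : Nat) :
    (pvFindLoop t w d chars start)[i]? =
      if start ≤ i ∧ w <+: t.drop i then some d else chars[i]? := by
  induction chars, start using pvFindLoop.induct t w d generalizing i with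
  | case1 chars start hw' => exact absurd hw' hw
  | case2 chars start hw' hs =>
      rw [pvFindLoop]; simp only [dif_neg hw', dif_pos hs]
      rw [if_neg]
      rintro ⟨hsi, hpre⟩
      have := pv_lt_of_prefix_drop hpre hw
      omega
  | case3 chars start hw' hs j h1 =>
      have h1' : PySem.Chars.findFrom t w (start : Int) = -1 := h1
      rw [pvFindLoop]; simp only [dif_neg hw', dif_neg hs, dif_pos h1']
      rw [if_neg]
      rintro ⟨hsi, hpre⟩
      have hnin := (PySem.Chars.findFrom_natCast_eq_neg_one_iff t w start (by omega)).mp h1'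
      have hdd : t.drop i = (t.drop start).drop (i - start) := by
        rw [List.drop_drop]; congr 1; omega
      rw [hdd] at hpre
      exact hnin (hpre.isInfix.trans (List.drop_suffix _ _).isInfix)
  | case4 chars start hw' hs j h1 ih =>
      have h1' : ¬ PySem.Chars.findFrom t w (start : Int) = -1 := h1
      obtain ⟨hle, hpre, hmin⟩ := PySem.Chars.findFrom_natCast_spec t w start (by omega) h1'
      have hjlt : (PySem.Chars.findFrom t w (start : Int)).toNat < t.length :=
        pv_lt_of_prefix_drop hpre hw
      have hleN : start ≤ (PySem.Chars.findFrom t w (start : Int)).toNat := by omega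
      have hset : PySem.List.pySetD chars (PySem.Chars.findFrom t w (start : Int)) d
          = chars.set (PySem.Chars.findFrom t w (start : Int)).toNat d :=
        PySem.List.pySetD_of_nonneg chars d (by omega)
      have ih' : (pvFindLoop t w d (PySem.List.pySetD chars (PySem.Chars.findFrom t w (start : Int)) d)
            ((PySem.Chars.findFrom t w (start : Int)).toNat + 1))[i]? =
          if (PySem.Chars.findFrom t w (start : Int)).toNat + 1 ≤ i ∧ w <+: t.drop i then some d
          else (PySem.List.pySetD chars (PySem.Chars.findFrom t w (start : Int)) d)[i]? :=
        ih (by rw [PySem.List.length_pySetD]; exact hlen) i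
      rw [pvFindLoop]; simp only [dif_neg hw', dif_neg hs]
      rw [dif_neg h1', ih', hset, List.getElem?_set]
      set J := (PySem.Chars.findFrom t w (start : Int)).toNat with hJ
      by_cases hcond : start ≤ i ∧ w <+: t.drop i
      · rw [if_pos hcond]
        obtain ⟨hsi, hp⟩ := hcond
        by_cases hgt : J + 1 ≤ i
        · rw [if_pos ⟨hgt, hp⟩]
        · have hij : i = J := by
            rcases Nat.lt_or_ge i J with h | h
            · exact absurd hp (hmin i hsi h)
            · omega
          rw [if_neg (by omega), if_pos hij.symm, if_pos (by omega)]
      · rw [if_neg hcond]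
        have hne : ¬ (J + 1 ≤ i ∧ w <+: t.drop i) := by
          rintro ⟨hgt, hp⟩
          exact hcond ⟨by omega, hp⟩
        rw [if_neg hne, if_neg (by
          intro hej
          exact hcond ⟨by omega, hej ▸ hpre⟩)]

def pvChoose (t : List Char) (i : Nat) : Char :=
  pvNumPairs.foldl (fun c wd => if PySem.Chars.startswith (t.drop i) wd.1 then wd.2 else c) (t.getD i 'A')

def pvSpecList (t : List Char) : List Char := (List.range t.length).map (pvChoose t)

theorem pvFoldB_length (ps : List (List Char × Char)) (t cs : List Char) :
    (ps.foldl (fun cs wd => pvFindLoop t wd.1 wd.2 cs 0) cs).length = cs.length := by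
  induction ps generalizing cs with
  | nil => rfl
  | cons p ps ih => simp only [List.foldl_cons]; rw [ih, pvFindLoop_length]

theorem pvFoldB_getElem? (ps : List (List Char × Char)) (h : ∀ p ∈ ps, p.1 ≠ [])
    (t cs : List Char) (hlen : cs.length = t.length) (i : Nat) (hi : i < t.length) :
    (ps.foldl (fun cs wd => pvFindLoop t wd.1 wd.2 cs 0) cs)[i]? =
      some (ps.foldl (fun c wd => if PySem.Chars.startswith (t.drop i) wd.1 then wd.2 else c)
        (cs.getD i 'A')) := by
  induction ps generalizing cs with
  | nil =>
      simp only [List.foldl_nil]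
      rw [List.getD_eq_getElem?_getD, List.getElem?_eq_getElem (by omega)]
      rfl
  | cons p ps ih =>
      simp only [List.foldl_cons]
      rw [ih (fun q hq => h q (List.mem_cons_of_mem _ hq)) _
        (by rw [pvFindLoop_length]; exact hlen)]
      congr 1
      rw [List.getD_eq_getElem?_getD,
        pvFindLoop_getElem? t p.1 (h p List.mem_cons_self) p.2 cs 0 hlen i]
      by_cases hp : p.1 <+: t.drop i
      · rw [if_pos ⟨Nat.zero_le i, hp⟩, if_pos ((PySem.Chars.startswith_iff _ _).mpr hp)]
        rfl
      · rw [if_neg (by rintro ⟨_, h2⟩; exact hp h2),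
          if_neg (by rw [PySem.Chars.startswith_iff]; exact hp),
          List.getD_eq_getElem?_getD]

theorem pvB_eq_spec (text : String) :
    convert_alpha_to_digits_alt text = String.ofList (pvSpecList text.toList) := by
  show String.ofList (List.foldl (fun chars wd => pvFindLoop text.toList wd.1 wd.2 chars 0)
      text.toList pvNumPairs) = String.ofList (pvSpecList text.toList)
  congr 1
  apply List.ext_getElem?
  intro i
  by_cases hi : i < text.toList.length
  · rw [pvFoldB_getElem? pvNumPairs (by decide) text.toList text.toList rfl i hi]
    unfold pvSpecList
    rw [List.getElem?_map, List.getElem?_range hi]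
    rfl
  · rw [List.getElem?_eq_none, List.getElem?_eq_none]
    · unfold pvSpecList; rw [List.length_map, List.length_range]; omega
    · rw [pvFoldB_length]; omega

theorem pvInnerFold (ps : List (List Char × Char)) (k : Nat) (P R : List Char)
    (hP : P.length = k) (sub : List Char) (c : Char) :
    ps.foldl (pvReplaceStep (k : Int) sub) (P ++ c :: R)
      = P ++ (ps.foldl (fun c wd => if PySem.Chars.startswith sub wd.1 then wd.2 else c) c) :: R := by
  induction ps generalizing c with
  | nil => rfl
  | cons p ps ih =>
      simp only [List.foldl_cons]
      by_cases hsw : PySem.Chars.startswith sub p.1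
      · rw [if_pos hsw]
        have hstep : pvReplaceStep (k : Int) sub (P ++ c :: R) p = P ++ p.2 :: R := by
          unfold pvReplaceStep
          rw [if_pos hsw, PySem.List.slice_to_natCast,
            show ((k : Int) + 1) = ((k + 1 : Nat) : Int) by push_cast; ring,
            PySem.List.slice_from_natCast, ← hP, List.take_left,
            show P ++ c :: R = (P ++ [c]) ++ R from by simp,
            List.drop_left' (l₁ := P ++ [c]) (by simp)]
          simp
        rw [hstep, ih]
      · rw [if_neg hsw]
        have hstep : pvReplaceStep (k : Int) sub (P ++ c :: R) p = P ++ c :: R := by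
          unfold pvReplaceStep
          rw [if_neg hsw]
        rw [hstep, ih]

def pvOuterStepN (copy : List Char) (j : Nat) : List Char := pvOuterStep copy (j : Int)

theorem pvAInv (l : List Char) (k : Nat) (hk : k ≤ l.length) :
    (List.range k).foldl pvOuterStepN l
      = (List.range k).map (pvChoose l) ++ l.drop k := by
  induction k with
  | zero => simp
  | succ k ih =>
      have hk' : k < l.length := by omega
      rw [List.range_succ, List.foldl_append, List.map_append, ih (by omega)]
      simp only [List.foldl_cons, List.foldl_nil, List.map_cons, List.map_nil]
      have hPlen : ((List.range k).map (pvChoose l)).length = k := by simp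
      have hdrop : l.drop k = l[k] :: l.drop (k + 1) := List.drop_eq_getElem_cons hk'
      unfold pvOuterStepN pvOuterStep
      rw [PySem.List.slice_from_natCast, List.drop_left' hPlen, hdrop, pvInnerFold _ k _ _ hPlen]
      have hchoose : pvChoose l k
          = pvNumPairs.foldl (fun c wd => if PySem.Chars.startswith (l[k] :: l.drop (k + 1)) wd.1 then wd.2 else c) l[k] := by
        unfold pvChoose
        rw [List.getD_eq_getElem l 'A' hk', hdrop]
      rw [← hchoose]
      simp

theorem pvA_eq_spec (text : String) :
    convert_alpha_to_digits text = String.ofList (pvSpecList text.toList) := by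
  unfold convert_alpha_to_digits
  congr 1
  have h1 : (PySem.List.enumerate text.toList).foldl (fun copy ic => pvOuterStep copy ic.1) text.toList
      = (List.range text.toList.length).foldl pvOuterStepN text.toList := by
    rw [← List.foldl_map (f := Prod.fst) (g := pvOuterStep), PySem.List.map_fst_enumerate,
      PySem.List.pyRange_one, List.foldl_map]
    simp
    rfl
  rw [h1, pvAInv text.toList text.toList.length (le_refl _), List.drop_length, List.append_nil]
  rfl

-- ===== VERDICT (by name: the statement is the Claim_ definition above) =====
theorem convert_alpha_to_digits_spec : Claim_equal_convert_alpha_to_digits := by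
  intro text _
  unfold Spec_convert_alpha_to_digits
  rw [pvA_eq_spec, pvB_eq_spec]
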